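-- pv_equiv track=rewrite | github.com/kkuivi/TCP-Server | socket_server.py | bottom_border
-- ===== SOURCE A (Python) =====
-- def bottom_border(canvas):
--     result = ""
--
--     for i in range(len(canvas) + 2):
--         if i == 0:
--             result += "╚"
--         elif i == len(canvas) + 1:
--             result += "╝"
--         else:
--             result += "═"
--
--     return result
-- ===== SOURCE B (Python) =====
-- def bottom_border(canvas):
--     return "\u255a" + "\u2550" * len(canvas) + "\u255d"
-- ===== Notes on version B (the rewrite author's own statement) =====
-- stated objective: simpler
-- what changed: Replaced the per-index loop with three-way branching by a single closed-form concatenation: left corner + horizontal bar repeated len(canvas) times + right corner.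
import Mathlib
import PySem

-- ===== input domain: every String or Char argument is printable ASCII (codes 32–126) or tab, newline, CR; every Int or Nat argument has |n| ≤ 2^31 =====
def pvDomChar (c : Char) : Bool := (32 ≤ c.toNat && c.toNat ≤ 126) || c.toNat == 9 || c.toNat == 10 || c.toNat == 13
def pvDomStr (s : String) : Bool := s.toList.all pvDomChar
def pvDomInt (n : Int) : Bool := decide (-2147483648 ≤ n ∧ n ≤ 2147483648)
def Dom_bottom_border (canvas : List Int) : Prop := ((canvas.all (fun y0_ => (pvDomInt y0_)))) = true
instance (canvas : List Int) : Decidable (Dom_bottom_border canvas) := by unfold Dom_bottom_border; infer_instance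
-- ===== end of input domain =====

-- B replaces A's indexed loop with three-way branching by a closed-form concatenation
-- corner ++ repeated bar ++ corner (objective: simpler).


-- ===== PORT A =====
def bottom_border (canvas : List Int) : String :=
  (PySem.List.pyRange 0 ((canvas.length : Int) + 2) 1).foldl
    (fun result i =>
      if i = 0 then result ++ "╚"
      else if i = (canvas.length : Int) + 1 then result ++ "╝"
      else result ++ "═") ""

-- ===== PORT B =====
def bottom_border_alt (canvas : List Int) : String :=
  "╚" ++ String.ofList (List.replicate canvas.length '═') ++ "╝"

-- ===== PRECONDITION & SPEC =====
def Spec_bottom_border (canvas : List Int) (out : String) : Prop := out = bottom_border_alt canvas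
instance (canvas : List Int) (out : String) : Decidable (Spec_bottom_border canvas out) := by unfold Spec_bottom_border; infer_instance

-- ===== CLAIM (what is proved, stated in full; the proofs are below) =====
def Claim_equal_bottom_border : Prop := ∀ (canvas : List Int), Dom_bottom_border canvas → Spec_bottom_border canvas (bottom_border canvas)

-- ===== LEMMAS AND PROOFS =====

-- the middle of A's loop: every index strictly between 0 and n+1 appends one bar
theorem mid_fold (n : ℕ) (s : String) :
    (PySem.List.pyRange 1 ((n : Int) + 1) 1).foldl (fun acc _ => acc ++ "═") s
      = s ++ String.ofList (List.replicate n '═') := by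
  induction n generalizing s with
  | zero =>
      rw [PySem.List.pyRange_one_eq_nil (by norm_num)]
      simp
  | succ m ih =>
      have hc : ((m + 1 : ℕ) : Int) + 1 = ((m : Int) + 1) + 1 := by push_cast; ring
      rw [hc, PySem.List.pyRange_one_succ_right (by omega)]
      rw [List.foldl_append, ih]
      simp [List.replicate_succ', String.ofList_append, String.append_assoc]

theorem bottom_border_spec : Claim_equal_bottom_border := by
  intro canvas _
  unfold Spec_bottom_border bottom_border bottom_border_alt
  set n := canvas.length with hn
  have hsplit : PySem.List.pyRange 0 ((n : Int) + 2) 1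
      = 0 :: (PySem.List.pyRange 1 ((n : Int) + 1) 1 ++ [(n : Int) + 1]) := by
    rw [show ((n : Int) + 2 : Int) = ((n : Int) + 1) + 1 by ring,
      PySem.List.pyRange_one_cons (by omega)]
    rw [PySem.List.pyRange_one_succ_right (by omega)]
    norm_num
  rw [hsplit, List.foldl_cons, List.foldl_append]
  have h3 : ¬ ((n : Int) + 1 = 0) := by omega
  simp only [List.foldl_cons, List.foldl_nil, if_neg h3, if_true, String.empty_append]
  have hmid : (PySem.List.pyRange 1 ((n : Int) + 1) 1).foldl
      (fun result i =>
        if i = 0 then result ++ "╚"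
        else if i = (n : Int) + 1 then result ++ "╝"
        else result ++ "═") "╚"
      = "╚" ++ String.ofList (List.replicate n '═') := by
    rw [← mid_fold n "╚"]
    apply PySem.List.foldl_congr_mem
    intro acc i hi
    rw [PySem.List.mem_pyRange_one] at hi
    have h1 : ¬ (i = 0) := by omega
    have h2 : ¬ (i = (n : Int) + 1) := by omega
    simp [h1, h2]
  rw [hmid]
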